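-- pv_equiv track=rewrite | github.com/yunbo646794/production_cost_estimator | api/merged.py | extract_crew
-- ===== SOURCE A (Python) =====
-- def extract_crew(credits: dict) -> tuple[dict, list]:
--     """Extract key crew members from credits and all job titles."""
--     crew = credits.get("crew", [])
--     result = {
--         "directors": [],
--         "writers": [],
--         "producers": [],
--         "composers": [],
--         "cinematographers": [],
--     }
--
--     job_mapping = {
--         "Director": "directors",
--         "Writer": "writers",
--         "Screenplay": "writers",
--         "Producer": "producers",
--         "Executive Producer": "producers",
--         "Original Music Composer": "composers",
--         "Director of Photography": "cinematographers",
--     }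
--
--     all_jobs = []
--     for person in crew:
--         job = person.get("job")
--         if job:
--             all_jobs.append(job)
--         if job in job_mapping:
--             key = job_mapping[job]
--             name = person.get("name")
--             if name and name not in result[key]:
--                 result[key].append(name)
--
--     return result, all_jobs
-- ===== SOURCE B (Python) =====
-- def extract_crew(credits: dict) -> tuple[dict, list]:
--     """Extract key crew members from credits and all job titles."""
--     crew = credits.get("crew", [])
--
--     job_mapping = {
--         "Director": "directors",
--         "Writer": "writers",
--         "Screenplay": "writers",
--         "Producer": "producers",
--         "Executive Producer": "producers",
--         "Original Music Composer": "composers",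
--         "Director of Photography": "cinematographers",
--     }
--
--     # Pass for the job titles.
--     all_jobs = [p.get("job") for p in crew if p.get("job")]
--
--     # Category-major traversal: one independent scan of crew per category,
--     # no mutable bucket dict; per-scan first-occurrence dedup via dict.fromkeys.
--     result = {
--         cat: list(dict.fromkeys(
--             p.get("name") for p in crew
--             if job_mapping.get(p.get("job")) == cat and p.get("name")
--         ))
--         for cat in ("directors", "writers", "producers", "composers", "cinematographers")
--     }
--     return result, all_jobs
-- ===== Notes on version B (the rewrite author's own statement) =====
-- stated objective: alternative
-- what changed: A's single crew-major loop that maintains a mutable bucket dict with an inline 'name not in result[key]' membership check is replaced by a category-major decomposition: a jobs comprehension plus one independent scan of crew per category (selecting names whose mapped category equals that category), each scan deduplicated afterwards with dict.fromkeys; no bucket dict is maintained at all.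
import Mathlib
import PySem

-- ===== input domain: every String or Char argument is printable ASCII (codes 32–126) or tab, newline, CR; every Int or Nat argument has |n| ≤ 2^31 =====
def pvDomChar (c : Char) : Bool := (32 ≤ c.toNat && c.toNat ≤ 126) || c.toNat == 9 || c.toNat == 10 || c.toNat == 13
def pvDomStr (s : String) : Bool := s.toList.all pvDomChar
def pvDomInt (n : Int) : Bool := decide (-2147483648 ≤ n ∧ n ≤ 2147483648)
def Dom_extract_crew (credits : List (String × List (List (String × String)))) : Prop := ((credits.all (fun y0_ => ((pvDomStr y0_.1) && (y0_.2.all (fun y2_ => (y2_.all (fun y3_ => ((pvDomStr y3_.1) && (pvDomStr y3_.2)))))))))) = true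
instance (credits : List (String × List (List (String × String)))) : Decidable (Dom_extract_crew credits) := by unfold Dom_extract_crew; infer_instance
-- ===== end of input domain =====

-- B inverts A's loop nesting: instead of one crew-major pass maintaining a mutable bucket
-- dict with an inline membership check, it runs one independent scan of crew per category
-- and dedups each scan's names afterwards (objective: alternative, same cost).

-- shared literal constants (both Pythons spell out exactly these literals)
def pvJobMapping : PySem.Dict String String := PySem.Dict.mk
  [("Director", "directors"), ("Writer", "writers"), ("Screenplay", "writers"),
   ("Producer", "producers"), ("Executive Producer", "producers"),
   ("Original Music Composer", "composers"), ("Director of Photography", "cinematographers")]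

-- ===== PORT A =====
def pvInitResult : PySem.Dict String (List String) := PySem.Dict.mk
  [("directors", []), ("writers", []), ("producers", []), ("composers", []), ("cinematographers", [])]

-- loop body for 'result'; 'result[key]' is ported as getD — exact, since key is a
-- value of job_mapping and every such value is a key of the initial result dict
def pvStepRes (res : PySem.Dict String (List String)) (person : List (String × String)) :
    PySem.Dict String (List String) :=
  match (PySem.Dict.mk person).get? "job" with
  | none => res
  | some j =>
    match pvJobMapping.get? j with
    | none => res
    | some key =>
      match (PySem.Dict.mk person).get? "name" with
      | none => res
      | some n =>
        if n ≠ "" ∧ n ∉ res.getD key [] then res.modify key [] (· ++ [n]) else res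

-- loop body for 'all_jobs' ('if job:' is string truthiness; None falls to the first arm)
def pvStepJobs (jobs : List String) (person : List (String × String)) : List String :=
  match (PySem.Dict.mk person).get? "job" with
  | none => jobs
  | some j => if j ≠ "" then jobs ++ [j] else jobs

def extract_crew (credits : List (String × List (List (String × String)))) :
    (List (String × List String)) × List String :=
  let crew := (PySem.Dict.mk credits).getD "crew" []
  let st := crew.foldl (fun st person => (pvStepRes st.1 person, pvStepJobs st.2 person))
      (pvInitResult, [])
  (st.1.items, st.2)

-- ===== PORT B =====
-- job_mapping.get(person.get("job")) (a missing job is None, which maps to no key)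
def pvKeyOf (person : List (String × String)) : Option String :=
  match (PySem.Dict.mk person).get? "job" with
  | some j => pvJobMapping.get? j
  | none => none

-- the generator 'p.get("name") for p in crew if job_mapping.get(p.get("job")) == cat and p.get("name")'
def pvRawNames (crew : List (List (String × String))) (cat : String) : List String :=
  crew.filterMap (fun p =>
    if pvKeyOf p = some cat then
      match (PySem.Dict.mk p).get? "name" with
      | some n => if n ≠ "" then some n else none
      | none => none
    else none)

def pvCats : List String := ["directors", "writers", "producers", "composers", "cinematographers"]

def extract_crew_alt (credits : List (String × List (List (String × String)))) :
    (List (String × List String)) × List String :=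
  let crew := (PySem.Dict.mk credits).getD "crew" []
  let all_jobs := crew.filterMap (fun person =>
    match (PySem.Dict.mk person).get? "job" with
    | some j => if j ≠ "" then some j else none
    | none => none)
  let result := pvCats.map (fun cat => (cat, PySem.List.dedup (pvRawNames crew cat)))
  (result, all_jobs)

-- ===== PRECONDITION & SPEC =====
def Spec_extract_crew (credits : List (String × List (List (String × String)))) (out : (List (String × List String)) × List String) : Prop := out = extract_crew_alt credits
instance (credits : List (String × List (List (String × String)))) (out : (List (String × List String)) × List String) : Decidable (Spec_extract_crew credits out) := by unfold Spec_extract_crew; infer_instance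

-- ===== CLAIM (what is proved, stated in full; the proofs are below) =====
def Claim_equal_extract_crew : Prop := ∀ (credits : List (String × List (List (String × String)))), Dom_extract_crew credits → Spec_extract_crew credits (extract_crew credits)

-- ===== LEMMAS AND PROOFS =====
theorem pvMapping_mem {j key : String} (h : pvJobMapping.get? j = some key) : key ∈ pvCats := by
  simp only [pvJobMapping, PySem.Dict.get?_mk_cons] at h
  split_ifs at h <;>
    first
      | (injection h with h; subst h; decide)
      | simp [PySem.Dict.get?] at h

theorem pvInit_getD (k : String) : pvInitResult.getD k [] = [] := by
  simp only [pvInitResult, PySem.Dict.getD_eq_get?_getD, PySem.Dict.get?_mk_cons]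
  split_ifs <;> rfl

theorem pvJobs_fold (crew : List (List (String × String))) (js : List String) :
    crew.foldl pvStepJobs js = js ++ crew.filterMap (fun person =>
      match (PySem.Dict.mk person).get? "job" with
      | some j => if j ≠ "" then some j else none
      | none => none) := by
  induction crew generalizing js with
  | nil => simp
  | cons p rest ih =>
    simp only [List.foldl_cons, List.filterMap_cons, ih, pvStepJobs]
    cases (PySem.Dict.mk p).get? "job" with
    | none => simp
    | some j => by_cases hj : j = "" <;> simp [hj]

-- a modify at one of the five category keys leaves the key list unchanged
theorem pvKeys_modify (d : PySem.Dict String (List String)) {key : String} (f : List String → List String)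
    (hk : key ∈ pvCats) (h : d.keys = pvCats) : (d.modify key [] f).keys = pvCats := by
  rw [PySem.Dict.keys_modify, PySem.Dict.keys_insert_of_contains]
  · exact h
  · rw [PySem.Dict.contains_eq_decide_mem_keys, h]; simpa using hk

theorem pvKeysRes_step (d : PySem.Dict String (List String)) (person : List (String × String))
    (h : d.keys = pvCats) : (pvStepRes d person).keys = pvCats := by
  unfold pvStepRes
  cases (PySem.Dict.mk person).get? "job" with
  | none => exact h
  | some j =>
    dsimp only
    cases hm : pvJobMapping.get? j with
    | none => exact h
    | some key =>
      cases (PySem.Dict.mk person).get? "name" with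
      | none => exact h
      | some n =>
        dsimp only
        split
        · exact pvKeys_modify d _ (pvMapping_mem hm) h
        · exact h

theorem pvKeysRes_fold (crew : List (List (String × String)))
    (d : PySem.Dict String (List String)) (h : d.keys = pvCats) :
    (crew.foldl pvStepRes d).keys = pvCats := by
  induction crew generalizing d with
  | nil => exact h
  | cons p rest ih => exact ih _ (pvKeysRes_step d p h)

-- the single-person contribution to category k
theorem pvRawNames_cons (p : List (String × String)) (rest : List (List (String × String)))
    (k : String) : pvRawNames (p :: rest) k = pvRawNames [p] k ++ pvRawNames rest k := by
  simp only [pvRawNames, List.filterMap_cons, List.filterMap_nil]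
  split <;> simp_all

-- invariant: A's online-deduplicated bucket at k is the dedup of acc k, and stays the
-- dedup of acc k extended by the names B's category-k scan collects from the rest
theorem pvRel_step (person : List (String × String))
    (dA : PySem.Dict String (List String)) (acc : String → List String)
    (h : ∀ k, dA.getD k [] = PySem.List.dedup (acc k)) (k : String) :
    (pvStepRes dA person).getD k [] = PySem.List.dedup (acc k ++ pvRawNames [person] k) := by
  unfold pvStepRes
  cases hj : (PySem.Dict.mk person).get? "job" with
  | none => simp [pvRawNames, pvKeyOf, hj, h k]
  | some j =>
    dsimp only
    cases hm : pvJobMapping.get? j with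
    | none => simp [pvRawNames, pvKeyOf, hj, hm, h k]
    | some key =>
      cases hn : (PySem.Dict.mk person).get? "name" with
      | none =>
        have hraw : pvRawNames [person] k = [] := by
          simp [pvRawNames, pvKeyOf, hj, hm, hn]
        simp [hraw, h k]
      | some n =>
        dsimp only
        have hrawk : pvRawNames [person] k = if key = k ∧ n ≠ "" then [n] else [] := by
          simp only [pvRawNames, List.filterMap_cons, List.filterMap_nil, pvKeyOf, hj, hm, hn]
          by_cases hk : key = k
          · subst hk
            by_cases hne : n = "" <;> simp [hne]
          · rw [if_neg (by simpa using hk)]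
            simp [hk]
        by_cases hne : n = ""
        · have hraw0 : pvRawNames [person] k = [] := by
            rw [hrawk, if_neg (by simp [hne])]
          rw [if_neg (by simp [hne]), hraw0]
          simp [h k]
        · have hmemiff : n ∈ dA.getD key [] ↔ n ∈ acc key := by
            rw [h key, PySem.List.dedup_eq_ofList, PySem.Set.mem_ofList]
          by_cases hk : key = k
          · subst hk
            have hraw1 : pvRawNames [person] key = [n] := by
              rw [hrawk, if_pos ⟨rfl, hne⟩]
            rw [hraw1]
            by_cases hmem : n ∈ dA.getD key []
            · rw [if_neg (by simp [hmem]), h key, PySem.List.dedup_eq_ofList,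
                  PySem.List.dedup_eq_ofList, PySem.Set.ofList_append_singleton,
                  PySem.Set.add_of_mem (by rw [PySem.Set.mem_ofList]; exact hmemiff.mp hmem)]
            · rw [if_pos ⟨hne, hmem⟩, PySem.Dict.getD_modify, if_pos rfl, h key,
                  PySem.List.dedup_eq_ofList, PySem.List.dedup_eq_ofList,
                  PySem.Set.ofList_append_singleton,
                  PySem.Set.add_of_not_mem (by rw [PySem.Set.mem_ofList]; exact fun c => hmem (hmemiff.mpr c))]
          · have hraw0 : pvRawNames [person] k = [] := by
              rw [hrawk, if_neg (by simp [hk])]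
            rw [hraw0]
            split
            · rw [PySem.Dict.getD_modify, if_neg (fun hh => hk hh.symm)]
              simp [h k]
            · simp [h k]

theorem pvRel_fold (crew : List (List (String × String)))
    (dA : PySem.Dict String (List String)) (acc : String → List String)
    (h : ∀ k, dA.getD k [] = PySem.List.dedup (acc k)) (k : String) :
    (crew.foldl pvStepRes dA).getD k [] = PySem.List.dedup (acc k ++ pvRawNames crew k) := by
  induction crew generalizing dA acc with
  | nil => simp [pvRawNames, h k]
  | cons p rest ih =>
    rw [List.foldl_cons, pvRawNames_cons, ← List.append_assoc]
    exact ih (pvStepRes dA p) (fun k' => acc k' ++ pvRawNames [p] k')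
      (fun k' => pvRel_step p dA acc h k')

-- ===== VERDICT (by name: the statement is the Claim_ definition above) =====
theorem extract_crew_spec : Claim_equal_extract_crew := by
  intro credits _
  unfold Spec_extract_crew extract_crew extract_crew_alt
  dsimp only
  rw [PySem.List.foldl_prod_mk (f := pvStepRes) (g := pvStepJobs)]
  set crew := (PySem.Dict.mk credits).getD "crew" [] with hcrew
  have hkA := pvKeysRes_fold crew pvInitResult (by decide)
  have hnd : pvCats.Nodup := by decide
  refine Prod.ext ?_ ?_
  · dsimp only
    rw [PySem.Dict.items_eq_map_keys _ (hkA ▸ hnd) ([] : List String), hkA]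
    refine List.map_congr_left (fun k _ => ?_)
    have := pvRel_fold crew pvInitResult (fun _ => []) (fun k' => by simp [pvInit_getD]) k
    simp only [List.nil_append] at this
    simp [this]
  · dsimp only
    simpa using pvJobs_fold crew []
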